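-- pv_equiv track=rewrite | github.com/yangyh-2025/moral-realism | src/prompts/behavior_prompts.py | filter_actions_by_constraints
-- ===== SOURCE A (Python) =====
-- from typing import Any, Dict, List, Optional, Tuple
--
-- def filter_actions_by_constraints(
--
--     actions: List[Dict[str, Any]],
--     prohibited: List[str],
--     prioritized: Optional[List[str]] = None,
-- ) -> tuple[List[Dict[str, Any]], List[str]]:
--     """
--     Filter actions based on leadership constraints.
--
--     Args:
--         actions: List of available actions.
--         prohibited: List of prohibited action types.
--         prioritized: Optional list of prioritized actions (brought to front).
--
--     Returns:
--         Tuple of (filtered_actions, removed_action_descriptions).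
--     """
--     filtered = []
--     removed = []
--
--     for action in actions:
--         action_type = action.get("action_type", action.get("id", ""))
--         description = action.get("description", "")
--
--         # Check if action is prohibited
--         is_prohibited = any(
--             action_type == prohibited_item or
--             prohibited_item.lower() in action_type.lower() or
--             action_type.lower() in prohibited_item.lower()
--             for prohibited_item in prohibited
--         )
--
--         if is_prohibited:
--             removed.append(f"{action_type}: {description}")
--         else:
--             filtered.append(action)
--
--     # If prioritized actions specified, reorder
--     if prioritized:
--         prioritized_items = []
--         other_items = []
--
--         for action in filtered:
--             action_type = action.get("action_type", action.get("id", ""))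
--             if any(
--                 action_type == p or p.lower() in action_type.lower()
--                 for p in prioritized
--             ):
--                 prioritized_items.append(action)
--             else:
--                 other_items.append(action)
--
--         filtered = prioritized_items + other_items
--
--     return filtered, removed
-- ===== SOURCE B (Python) =====
-- def filter_actions_by_constraints(actions, prohibited, prioritized=None):
--     def atype(a):
--         return a.get("action_type", a.get("id", ""))
--
--     def banned(t):
--         return any(
--             t == p or p.lower() in t.lower() or t.lower() in p.lower()
--             for p in prohibited
--         )
--
--     removed = [f"{atype(a)}: {a.get('description', '')}" for a in actions if banned(atype(a))]
--     kept = [a for a in actions if not banned(atype(a))]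
--     if prioritized:
--         # stable sort: prioritized actions (key False) come first, others keep order
--         kept = sorted(
--             kept,
--             key=lambda a: not any(
--                 atype(a) == p or p.lower() in atype(a).lower() for p in prioritized
--             ),
--         )
--     return kept, removed
-- ===== Notes on version B (the rewrite author's own statement) =====
-- stated objective: alternative
-- what changed: Replaced A's imperative append-loops and explicit two-list repartition by declarative filter comprehensions plus a stable sort on a boolean 'not prioritized' key, which brings prioritized survivors to the front via sort stability instead of a second partitioning pass.
import Mathlib
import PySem

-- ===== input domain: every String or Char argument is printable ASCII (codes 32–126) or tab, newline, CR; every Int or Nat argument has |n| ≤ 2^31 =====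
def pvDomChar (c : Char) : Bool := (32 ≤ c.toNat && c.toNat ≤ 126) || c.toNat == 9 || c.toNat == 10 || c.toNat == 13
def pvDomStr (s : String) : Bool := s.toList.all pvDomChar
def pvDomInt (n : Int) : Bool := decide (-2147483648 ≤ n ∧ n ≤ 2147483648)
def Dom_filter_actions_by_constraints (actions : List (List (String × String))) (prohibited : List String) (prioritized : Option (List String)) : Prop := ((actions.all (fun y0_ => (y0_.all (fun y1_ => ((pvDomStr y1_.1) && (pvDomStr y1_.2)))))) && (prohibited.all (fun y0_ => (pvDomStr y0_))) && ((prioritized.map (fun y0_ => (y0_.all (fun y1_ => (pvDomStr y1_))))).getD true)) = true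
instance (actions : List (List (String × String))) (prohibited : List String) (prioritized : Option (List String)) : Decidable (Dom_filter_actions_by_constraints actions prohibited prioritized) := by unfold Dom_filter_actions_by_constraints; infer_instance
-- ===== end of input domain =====

-- B replaces A's imperative append-loops and explicit repartition pass by filter
-- comprehensions plus a stable sort on a boolean key; alternative decomposition, same observable result.

-- shared helpers: these Python expressions occur verbatim in both A and B
-- action.get(k, dflt) — dict lookup = first match in the association list
def pvGetD (d : List (String × String)) (k dflt : String) : String :=
  match d.find? (fun p => p.1 == k) with
  | some p => p.2
  | none => dflt

-- action.get("action_type", action.get("id", ""))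
def pvAType (a : List (String × String)) : String :=
  pvGetD a "action_type" (pvGetD a "id" "")

-- any(t == p or p.lower() in t.lower() or t.lower() in p.lower() for p in prohibited)
def pvIsProhibited (prohibited : List String) (t : String) : Bool :=
  prohibited.any (fun p =>
    t == p || PySem.Str.isIn (PySem.Str.lower p) (PySem.Str.lower t)
           || PySem.Str.isIn (PySem.Str.lower t) (PySem.Str.lower p))

-- any(t == p or p.lower() in t.lower() for p in ps)
def pvIsPrioritized (ps : List String) (t : String) : Bool :=
  ps.any (fun p => t == p || PySem.Str.isIn (PySem.Str.lower p) (PySem.Str.lower t))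

-- f"{action_type}: {description}"
def pvDesc (a : List (String × String)) : String :=
  pvAType a ++ ": " ++ pvGetD a "description" ""

-- ===== PORT A =====
def filter_actions_by_constraints (actions : List (List (String × String))) (prohibited : List String) (prioritized : Option (List String)) : (List (List (String × String))) × List String :=
  -- first loop: filtered / removed
  let fr := actions.foldl (fun (fr : List (List (String × String)) × List String) a =>
      if pvIsProhibited prohibited (pvAType a) then
        (fr.1, fr.2 ++ [pvDesc a])
      else
        (fr.1 ++ [a], fr.2)) ([], [])
  -- `if prioritized:` — truthy iff some nonempty list
  match prioritized with
  | some ps =>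
      if ps.isEmpty then (fr.1, fr.2)
      else
        -- second loop: repartition filtered
        let po := fr.1.foldl (fun (po : List (List (String × String)) × List (List (String × String))) a =>
            if pvIsPrioritized ps (pvAType a) then
              (po.1 ++ [a], po.2)
            else
              (po.1, po.2 ++ [a])) ([], [])
        (po.1 ++ po.2, fr.2)
  | none => (fr.1, fr.2)

-- ===== PORT B =====
-- two filter comprehensions, then a stable sort by the boolean key `not prioritized`
-- (Python's bool sorts as the int 0/1; the key is ported as that Nat — exact)
def filter_actions_by_constraints_alt (actions : List (List (String × String))) (prohibited : List String) (prioritized : Option (List String)) : (List (List (String × String))) × List String :=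
  let removed := (actions.filter (fun a => pvIsProhibited prohibited (pvAType a))).map pvDesc
  let kept := actions.filter (fun a => !pvIsProhibited prohibited (pvAType a))
  -- `if prioritized:` — truthy iff some nonempty list
  match prioritized with
  | some ps =>
      if ps.isEmpty then (kept, removed)
      else
        (PySem.List.sorted kept
          (fun a => if pvIsPrioritized ps (pvAType a) then (0 : Nat) else 1) false,
         removed)
  | none => (kept, removed)

-- ===== PRECONDITION & SPEC =====
def Spec_filter_actions_by_constraints (actions : List (List (String × String))) (prohibited : List String) (prioritized : Option (List String)) (out : (List (List (String × String))) × List String) : Prop := out = filter_actions_by_constraints_alt actions prohibited prioritized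
instance (actions : List (List (String × String))) (prohibited : List String) (prioritized : Option (List String)) (out : (List (List (String × String))) × List String) : Decidable (Spec_filter_actions_by_constraints actions prohibited prioritized out) := by unfold Spec_filter_actions_by_constraints; infer_instance

-- ===== CLAIM (what is proved, stated in full; the proofs are below) =====
def Claim_equal_filter_actions_by_constraints : Prop := ∀ (actions : List (List (String × String))) (prohibited : List String) (prioritized : Option (List String)), Dom_filter_actions_by_constraints actions prohibited prioritized → Spec_filter_actions_by_constraints actions prohibited prioritized (filter_actions_by_constraints actions prohibited prioritized)

-- ===== LEMMAS AND PROOFS =====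

-- closed forms of A's two loops
theorem foldlA_eq (prohibited : List String) (l : List (List (String × String))) (F : List (List (String × String))) (R : List String) :
    l.foldl (fun (fr : List (List (String × String)) × List String) a =>
      if pvIsProhibited prohibited (pvAType a) then
        (fr.1, fr.2 ++ [pvDesc a])
      else
        (fr.1 ++ [a], fr.2)) (F, R)
    = (F ++ l.filter (fun a => !pvIsProhibited prohibited (pvAType a)),
       R ++ (l.filter (fun a => pvIsProhibited prohibited (pvAType a))).map pvDesc) := by
  induction l generalizing F R with
  | nil => simp
  | cons a t ih =>
      by_cases h : pvIsProhibited prohibited (pvAType a)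
      · simp [h, ih]
      · simp [h, ih]

theorem foldlP_eq (ps : List String) (l : List (List (String × String))) (P O : List (List (String × String))) :
    l.foldl (fun (po : List (List (String × String)) × List (List (String × String))) a =>
      if pvIsPrioritized ps (pvAType a) then
        (po.1 ++ [a], po.2)
      else
        (po.1, po.2 ++ [a])) (P, O)
    = (P ++ l.filter (fun a => pvIsPrioritized ps (pvAType a)),
       O ++ l.filter (fun a => !pvIsPrioritized ps (pvAType a))) := by
  induction l generalizing P O with
  | nil => simp
  | cons a t ih =>
      by_cases h : pvIsPrioritized ps (pvAType a)
      · simp [h, ih]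
      · simp [h, ih]

-- insertBy unfolding equations (PySem definitions are transparent)
theorem insertBy_nil {α : Type} (b : α → α → Bool) (x : α) :
    PySem.List.insertBy b x [] = [x] := rfl

theorem insertBy_cons {α : Type} (b : α → α → Bool) (x y : α) (t : List α) :
    PySem.List.insertBy b x (y :: t) = if b x y then x :: y :: t else y :: PySem.List.insertBy b x t := rfl

-- insertBy skips a prefix it is never inserted before
theorem insertBy_append_skip {α : Type} (b : α → α → Bool) (x : α) (T F : List α)
    (h : ∀ y ∈ T, b x y = false) :
    PySem.List.insertBy b x (T ++ F) = T ++ PySem.List.insertBy b x F := by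
  induction T with
  | nil => simp
  | cons y t ih =>
      have hy : b x y = false := h y (by simp)
      simp [insertBy_cons, hy]
      exact ih (fun z hz => h z (by simp [hz]))

-- the boolean-key "before" relation used by B's sort
def pvBefore {α : Type} (p : α → Bool) : α → α → Bool :=
  fun a b => decide ((if p a then (0 : Nat) else 1) < (if p b then (0 : Nat) else 1))

-- the insertion-sort foldl with a two-valued key keeps two stable blocks
theorem foldl_ins_partition {α : Type} (p : α → Bool) (l : List α) :
    ∀ (Z O : List α), (∀ y ∈ Z, p y = true) → (∀ y ∈ O, p y = false) →
    l.foldl (fun acc x => PySem.List.insertBy (pvBefore p) x acc) (Z ++ O)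
    = (Z ++ l.filter p) ++ (O ++ l.filter (fun a => !p a)) := by
  induction l with
  | nil => intro Z O _ _; simp
  | cons x t ih =>
      intro Z O hZ hO
      by_cases hx : p x = true
      · have hins : PySem.List.insertBy (pvBefore p) x (Z ++ O) = (Z ++ [x]) ++ O := by
          rw [insertBy_append_skip]
          · cases O with
            | nil => simp [insertBy_nil]
            | cons y o =>
                have hy : p y = false := hO y (by simp)
                simp [insertBy_cons, pvBefore, hx, hy]
          · intro y hy
            have := hZ y hy
            simp [pvBefore, hx, this]
        simp only [List.foldl_cons, hins]
        rw [ih (Z ++ [x]) O (by intro y hy; rcases List.mem_append.mp hy with h | h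
                                · exact hZ y h
                                · simp at h; simpa [h] using hx) hO]
        simp [hx]
      · have hx' : p x = false := by simpa using hx
        have hins : PySem.List.insertBy (pvBefore p) x (Z ++ O) = Z ++ (O ++ [x]) := by
          rw [← List.append_assoc]
          have := insertBy_append_skip (pvBefore p) x (Z ++ O) []
            (by intro y hy
                rcases List.mem_append.mp hy with h | h
                · have := hZ y h; simp [pvBefore, hx', this]
                · have := hO y h; simp [pvBefore, hx', this])
          simpa [insertBy_nil] using this
        simp only [List.foldl_cons, hins]
        rw [ih Z (O ++ [x]) hZ (by intro y hy; rcases List.mem_append.mp hy with h | h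
                                   · exact hO y h
                                   · simp at h; simpa [h] using hx')]
        simp [hx']

-- B's stable sort by the boolean key is exactly A's repartition
theorem sorted_bool_partition {α : Type} [BEq α] [LawfulBEq α] (p : α → Bool) (l : List α) :
    PySem.List.sorted l (fun a => if p a then (0 : Nat) else 1) false
    = l.filter p ++ l.filter (fun a => !p a) := by
  rw [PySem.List.sorted_eq_foldl_insertBy]
  have := foldl_ins_partition p l [] [] (by simp) (by simp)
  simpa [pvBefore] using this

-- ===== VERDICT (by name: the statement is the Claim_ definition above) =====
theorem filter_actions_by_constraints_spec : Claim_equal_filter_actions_by_constraints := by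
  intro actions prohibited prioritized _
  unfold Spec_filter_actions_by_constraints filter_actions_by_constraints filter_actions_by_constraints_alt
  match prioritized with
  | none => simp [foldlA_eq]
  | some ps =>
      by_cases hps : ps.isEmpty
      · simp [hps, foldlA_eq]
      · simp [hps, foldlA_eq, foldlP_eq, sorted_bool_partition]
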